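-- pv_equiv track=rewrite | github.com/Meiroudii/tertris-clone | game.py | rotations_from_matrix
-- ===== SOURCE A (Python) =====
-- def rotations_from_matrix(mat):
--     """Return list of 4 rotation states from base matrix."""
--     rots = []
--     current = [row[:] for row in mat]
--     for _ in range(4):
--         rots.append([row[:] for row in current])
--         # rotate 90 clockwise
--         current = [list(r) for r in zip(*current[::-1])]
--     # remove duplicates (O and symmetric shapes)
--     uniq = []
--     for r in rots:
--         if r not in uniq:
--             uniq.append(r)
--     return uniq
-- ===== SOURCE B (Python) =====
-- def rotations_from_matrix(mat):
--     """Return list of 4 rotation states from base matrix."""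
--     r1 = [list(r) for r in zip(*mat[::-1])]   # 90 degrees clockwise
--     r2 = [list(r)[::-1] for r in zip(*r1)]    # 180 = mirror each row of r1's transpose
--     r3 = [row[::-1] for row in r1[::-1]]      # 270 = r1 flipped both ways
--     states = [[list(row) for row in mat], r1, r2, r3]
--     uniq = []
--     for s in states:
--         if s not in uniq:
--             uniq.append(s)
--     return uniq
-- ===== Notes on version B (the rewrite author's own statement) =====
-- stated objective: alternative
-- what changed: Instead of folding one 90-degree zip-rotation four times with per-iteration copies, B derives the four orientations directly: one real 90-degree rotation r1, then 180 as a row-mirrored transpose of r1 and 270 as a double flip of r1 (no further rotation fold), then the same order-preserving dedup loop.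
import Mathlib
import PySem

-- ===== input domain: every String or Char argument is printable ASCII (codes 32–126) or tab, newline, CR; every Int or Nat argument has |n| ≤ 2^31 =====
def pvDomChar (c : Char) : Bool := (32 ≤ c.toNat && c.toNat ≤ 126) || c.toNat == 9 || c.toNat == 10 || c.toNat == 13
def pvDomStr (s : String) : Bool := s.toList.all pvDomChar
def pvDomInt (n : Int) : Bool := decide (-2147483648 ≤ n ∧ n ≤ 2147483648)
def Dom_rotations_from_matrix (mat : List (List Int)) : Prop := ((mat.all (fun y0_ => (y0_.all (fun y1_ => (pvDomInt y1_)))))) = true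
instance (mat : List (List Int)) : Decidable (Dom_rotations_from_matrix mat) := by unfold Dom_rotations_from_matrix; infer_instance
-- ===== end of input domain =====

-- B derives the four orientations directly (one 90° rotation, then a mirrored transpose
-- and a double flip of it) instead of folding one zip-rotation four times; alternative
-- decomposition, same cost.

-- ===== PORT A =====
-- Python's zip(*m): zip of the rows, truncating to the shortest row; zip of no rows is empty.
def zipstar (m : List (List Int)) : List (List Int) :=
  if h : m = [] ∨ [] ∈ m then []
  else (m.map (fun r => r.headI)) :: zipstar (m.map (fun r => r.tail))
termination_by m.headI.length
decreasing_by
  push_neg at h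
  obtain ⟨h1, h2⟩ := h
  cases m with
  | nil => exact absurd rfl h1
  | cons a t =>
    have ha : a ≠ [] := fun e => h2 (by simpa [e] using List.mem_cons_self (l := t) (a := ([] : List Int)))
    cases a with
    | nil => exact absurd rfl ha
    | cons x xs => simp

def rotations_from_matrix (mat : List (List Int)) : List (List (List Int)) :=
  -- current = [row[:] for row in mat]; for _ in range(4): append copy; rotate via zip(*current[::-1])
  let current := mat.map (fun row => row)
  let st := (PySem.List.pyRange 0 4 1).foldl
      (fun (st : List (List (List Int)) × List (List Int)) _ =>
        (st.1 ++ [st.2.map (fun row => row)], zipstar st.2.reverse))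
      ([], current)
  st.1.foldl (fun uniq r => if r ∈ uniq then uniq else uniq ++ [r]) []

-- ===== PORT B =====
def rotations_from_matrix_alt (mat : List (List Int)) : List (List (List Int)) :=
  let r1 := zipstar mat.reverse                          -- [list(r) for r in zip(*mat[::-1])]
  let r2 := (zipstar r1).map (fun r => r.reverse)        -- [list(r)[::-1] for r in zip(*r1)]
  let r3 := r1.reverse.map (fun row => row.reverse)      -- [row[::-1] for row in r1[::-1]]
  let states := [mat.map (fun row => row), r1, r2, r3]
  states.foldl (fun uniq s => if s ∈ uniq then uniq else uniq ++ [s]) []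

-- ===== PRECONDITION & SPEC =====
def Spec_rotations_from_matrix (mat : List (List Int)) (out : List (List (List Int))) : Prop := out = rotations_from_matrix_alt mat
instance (mat : List (List Int)) (out : List (List (List Int))) : Decidable (Spec_rotations_from_matrix mat out) := by unfold Spec_rotations_from_matrix; infer_instance

-- ===== CLAIM (what is proved, stated in full; the proofs are below) =====
def Claim_equal_rotations_from_matrix : Prop := ∀ (mat : List (List Int)), Dom_rotations_from_matrix mat → Spec_rotations_from_matrix mat (rotations_from_matrix mat)

-- ===== LEMMAS AND PROOFS =====

theorem zipstar_nil : zipstar [] = [] := by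
  unfold zipstar; simp

theorem zipstar_row_len_aux : ∀ (n : Nat) (m : List (List Int)), m.headI.length = n →
    ∀ r ∈ zipstar m, r.length = m.length := by
  intro n
  induction n using Nat.strong_induction_on with
  | _ n ih =>
    intro m hn r hr
    rw [zipstar] at hr
    by_cases h : (m = [] ∨ [] ∈ m)
    · rw [dif_pos h] at hr
      exact absurd hr List.not_mem_nil
    · rw [dif_neg h] at hr
      push_neg at h
      rcases List.mem_cons.mp hr with rfl | hr
      · simp
      · have hlt : (m.map (fun r : List Int => r.tail)).headI.length < n := by
          cases m with
          | nil => exact absurd rfl h.1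
          | cons a t =>
            have ha : a ≠ [] := fun e => h.2 (e ▸ List.mem_cons_self ..)
            cases a with
            | nil => exact absurd rfl ha
            | cons x xs => simp at hn ⊢; omega
        have := ih _ hlt (m.map (fun r : List Int => r.tail)) rfl r hr
        simpa using this

theorem zipstar_row_len (m : List (List Int)) : ∀ r ∈ zipstar m, r.length = m.length :=
  zipstar_row_len_aux m.headI.length m rfl

theorem zipstar_spec (L : Nat) : ∀ (m : List (List Int)), m ≠ [] →
    (∀ r ∈ m, r.length = L) →
    zipstar m = (List.range L).map (fun i => m.map (fun r => r.getD i 0)) := by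
  induction L with
  | zero =>
    intro m hm hrect
    have hmem : [] ∈ m := by
      cases m with
      | nil => exact absurd rfl hm
      | cons a t =>
        have := hrect a (List.mem_cons_self ..)
        have : a = [] := List.eq_nil_of_length_eq_zero this
        exact this ▸ List.mem_cons_self ..
    rw [zipstar, dif_pos (Or.inr hmem)]
    simp
  | succ L ih =>
    intro m hm hrect
    have hne : ¬ (m = [] ∨ [] ∈ m) := by
      push_neg
      exact ⟨hm, fun hmem => by simpa using hrect [] hmem⟩
    rw [zipstar, dif_neg hne]
    push_neg at hne
    have htne : m.map (fun r => r.tail) ≠ [] := by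
      cases m with
      | nil => exact absurd rfl hm
      | cons a t => simp
    have htrect : ∀ r ∈ m.map (fun r => r.tail), r.length = L := by
      intro r hr
      obtain ⟨s, hs, rfl⟩ := List.mem_map.mp hr
      have := hrect s hs
      simp [List.length_tail, this]
    rw [ih _ htne htrect]
    rw [List.range_succ_eq_map]
    simp only [List.map_cons, List.map_map]
    congr 1
    · apply List.map_congr_left
      intro r hr
      have hrne : r ≠ [] := fun e => hne.2 (e ▸ hr)
      cases r with
      | nil => exact absurd rfl hrne
      | cons x xs => simp
    · apply List.map_congr_left
      intro i _
      apply List.map_congr_left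
      intro r hr
      have hrne : r ≠ [] := fun e => hne.2 (e ▸ hr)
      cases r with
      | nil => exact absurd rfl hrne
      | cons x xs => simp [Function.comp]

theorem row_eta (row : List Int) (L : Nat) (h : row.length = L) :
    (List.range L).map (fun i => row.getD i 0) = row := by
  apply List.ext_getElem
  · simp [h]
  · intro i h1 h2
    simp only [List.getElem_map, List.getElem_range]
    exact List.getD_eq_getElem row 0 h2

-- 180° of a rectangular matrix a equals each row of the transpose reversed.
theorem rot_eq_map_rev (a : List (List Int)) (L : Nat) (ha : a ≠ [])
    (hrect : ∀ r ∈ a, r.length = L) :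
    zipstar a.reverse = (zipstar a).map (fun r => r.reverse) := by
  have har : a.reverse ≠ [] := by simpa using ha
  have harect : ∀ r ∈ a.reverse, r.length = L := fun r hr => hrect r (List.mem_reverse.mp hr)
  rw [zipstar_spec L a.reverse har harect, zipstar_spec L a ha hrect, List.map_map]
  apply List.map_congr_left
  intro i _
  simp [List.map_reverse]

-- 180° (two zip-rotations) of a rectangular matrix a equals flipping rows and columns.
theorem rot_rot_eq_flip (a : List (List Int)) (L : Nat) (ha : a ≠ []) (hL : 0 < L)
    (hrect : ∀ r ∈ a, r.length = L) :
    zipstar (zipstar a.reverse).reverse = a.reverse.map (fun r => r.reverse) := by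
  have har : a.reverse ≠ [] := by simpa using ha
  have harect : ∀ r ∈ a.reverse, r.length = L := fun r hr => hrect r (List.mem_reverse.mp hr)
  have hb : zipstar a.reverse = (List.range L).map (fun i => a.reverse.map (fun r => r.getD i 0)) :=
    zipstar_spec L a.reverse har harect
  set k := a.length with hk
  have hk0 : 0 < k := List.length_pos_iff.mpr ha
  have hbne : (zipstar a.reverse).reverse ≠ [] := by
    rw [hb]
    simp [List.range_eq_nil, Nat.pos_iff_ne_zero.mp hL]
  have hbrect : ∀ r ∈ (zipstar a.reverse).reverse, r.length = k := by
    intro r hr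
    have := zipstar_row_len a.reverse r (List.mem_reverse.mp hr)
    simpa using this
  rw [zipstar_spec k _ hbne hbrect]
  apply List.ext_getElem
  · simp [hk]
  · intro j hj1 hj2
    have hjk : j < k := by simpa using hj1
    have hjr : j < a.reverse.length := by simpa using hjk
    simp only [List.getElem_map, List.getElem_range]
    have hrowlen : (a.reverse[j]'hjr).length = L := harect _ (List.getElem_mem hjr)
    rw [List.map_reverse, hb, List.map_map]
    apply congrArg List.reverse
    have hmap : (List.range L).map ((fun r => r.getD j 0) ∘ fun i => a.reverse.map (fun r => r.getD i 0))
        = (List.range L).map (fun i => (a.reverse[j]'hjr).getD i 0) := by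
      apply List.map_congr_left
      intro i _
      simp only [Function.comp]
      rw [List.getD_eq_getElem _ 0 (by simpa using hjr)]
      simp
    rw [hmap, row_eta _ L hrowlen]

theorem states_eq (mat : List (List Int)) :
    zipstar (zipstar mat.reverse).reverse
      = (zipstar (zipstar mat.reverse)).map (fun r => r.reverse)
    ∧ zipstar (zipstar (zipstar mat.reverse).reverse).reverse
      = (zipstar mat.reverse).reverse.map (fun row => row.reverse) := by
  by_cases h1 : zipstar mat.reverse = []
  · rw [h1]
    simp [zipstar_nil]
  · have hmne : mat ≠ [] := by
      intro e; apply h1; rw [e]; simpa using zipstar_nil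
    have hL : 0 < mat.length := List.length_pos_iff.mpr hmne
    have hrect : ∀ r ∈ zipstar mat.reverse, r.length = mat.length := by
      intro r hr
      simpa using zipstar_row_len mat.reverse r hr
    exact ⟨rot_eq_map_rev _ mat.length h1 hrect,
           rot_rot_eq_flip _ mat.length h1 hL hrect⟩

-- ===== VERDICT (by name: the statement is the Claim_ definition above) =====
theorem A_rots (c : List (List Int)) :
    ((PySem.List.pyRange 0 4 1).foldl
      (fun (st : List (List (List Int)) × List (List Int)) _ =>
        (st.1 ++ [st.2.map (fun row => row)], zipstar st.2.reverse))
      ([], c)).1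
    = [c, zipstar c.reverse, zipstar (zipstar c.reverse).reverse,
        zipstar (zipstar (zipstar c.reverse).reverse).reverse] := by
  have hrange : PySem.List.pyRange 0 4 1 = [0, 1, 2, 3] := by decide
  rw [hrange]
  simp [List.map_id']

theorem rotations_from_matrix_spec : Claim_equal_rotations_from_matrix := by
  intro mat _
  unfold Spec_rotations_from_matrix rotations_from_matrix rotations_from_matrix_alt
  dsimp only
  rw [A_rots]
  obtain ⟨h2, h3⟩ := states_eq mat
  simp only [List.map_id']
  congr 1
  rw [h3, h2]
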